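-- pv_equiv track=rewrite | github.com/PythonicHiss/Learning-Projects | Algorithms1.py | locate_cards
-- ===== SOURCE A (Python) =====
-- def locate_cards(cards, query):
--     position = 0
--     while position < len(cards):
--         if len(cards) == 0:
--             return -1
--         if position > len(cards):
--             return -1
--         if cards[position] == query:
--             return position
--         else:
--             position += 1
--     return -1
-- ===== SOURCE B (Python) =====
-- def locate_cards(cards, query):
--     # Scan right-to-left, building the first-match index back-to-front:
--     # a match resets the running answer to 0; any later (i.e. more leftward)
--     # element pushes an already-found answer one position further right.
--     ans = -1
--     for x in reversed(cards):
--         if x == query: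
--             ans = 0
--         elif ans != -1:
--             ans += 1
--     return ans
-- ===== Notes on version B (the rewrite author's own statement) =====
-- stated objective: alternative
-- what changed: A's left-to-right while loop with a position counter (and dead guard branches re-evaluating len(cards) each step) is replaced by a right-to-left for-loop over reversed(cards) that builds the leftmost-match index back-to-front: the accumulator resets to 0 at every match and increments past each element to its left once a match exists.
import Mathlib
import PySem

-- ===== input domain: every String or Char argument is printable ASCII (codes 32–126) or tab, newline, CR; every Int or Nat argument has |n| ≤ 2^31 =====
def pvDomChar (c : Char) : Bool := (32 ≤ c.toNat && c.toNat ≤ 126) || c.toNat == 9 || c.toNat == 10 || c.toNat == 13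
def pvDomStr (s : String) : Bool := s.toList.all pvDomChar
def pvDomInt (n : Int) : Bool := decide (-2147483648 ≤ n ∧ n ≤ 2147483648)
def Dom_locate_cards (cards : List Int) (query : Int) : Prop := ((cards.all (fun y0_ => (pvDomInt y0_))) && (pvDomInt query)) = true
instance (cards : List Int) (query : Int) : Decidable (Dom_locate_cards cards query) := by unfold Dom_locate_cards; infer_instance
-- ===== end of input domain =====

-- B replaces A's left-to-right while loop by a right-to-left fold that builds the leftmost-match index back-to-front (reset to 0 at a match, +1 past each element to its left); objective: alternative, same O(n) cost.


-- ===== PORT A =====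
-- the while loop of A, step for step: position counter, the two (dead) guard branches in order, then the comparison
def locateLoopA (cards : List Int) (query : Int) (position : Nat) : Int :=
  if h : position < cards.length then
    if cards.length = 0 then -1
    else if position > cards.length then -1
    else if cards[position] = query then (position : Int)
    else locateLoopA cards query (position + 1)
  else -1
termination_by cards.length - position

def locate_cards (cards : List Int) (query : Int) : Int :=
  locateLoopA cards query 0

-- ===== PORT B =====
-- Source B: for x in reversed(cards): if x == query: ans = 0 elif ans != -1: ans += 1
def locate_cards_alt (cards : List Int) (query : Int) : Int :=
  cards.reverse.foldl
    (fun ans x => if x = query then 0 else if ans ≠ -1 then ans + 1 else ans) (-1)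

-- ===== PRECONDITION & SPEC =====
def Spec_locate_cards (cards : List Int) (query : Int) (out : Int) : Prop := out = locate_cards_alt cards query
instance (cards : List Int) (query : Int) (out : Int) : Decidable (Spec_locate_cards cards query out) := by unfold Spec_locate_cards; infer_instance

-- ===== CLAIM (what is proved, stated in full; the proofs are below) =====
def Claim_equal_locate_cards : Prop := ∀ (cards : List Int) (query : Int), Dom_locate_cards cards query → Spec_locate_cards cards query (locate_cards cards query)

-- ===== LEMMAS AND PROOFS =====

-- the loop starting at `position` computes the first index of `query` in `cards.drop position`, shifted by `position`
theorem locateLoopA_eq (cards : List Int) (query : Int) (position : Nat) :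
    locateLoopA cards query position =
      match PySem.List.index? (cards.drop position) query with
      | some i => ((position + i : Nat) : Int)
      | none => -1 := by
  by_cases h : position < cards.length
  · rw [locateLoopA]
    have hne : cards.length ≠ 0 := by omega
    have hle : ¬ position > cards.length := by omega
    simp only [dif_pos h, if_neg hne, if_neg hle]
    have hdrop : cards.drop position = cards[position] :: cards.drop (position + 1) :=
      (List.drop_eq_getElem_cons h)
    by_cases hq : cards[position] = query
    · rw [if_pos hq, hdrop, hq]
      rw [PySem.List.index?_cons_self]
      simp
    · rw [if_neg hq, hdrop]
      rw [PySem.List.index?_cons_of_ne _ hq]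
      rw [locateLoopA_eq cards query (position + 1)]
      cases PySem.List.index? (cards.drop (position + 1)) query with
      | none => simp
      | some i =>
        simp only [Option.map_some]
        push_cast
        ring
  · rw [locateLoopA]
    simp only [dif_neg h]
    have : cards.drop position = [] := List.drop_eq_nil_of_le (by omega)
    rw [this]
    simp [PySem.List.index?_eq_idxOf?]
termination_by cards.length - position

-- the right-to-left fold of B also computes the first index of `query` in `cards`
theorem foldB_eq (cards : List Int) (query : Int) :
    locate_cards_alt cards query =
      match PySem.List.index? cards query with
      | some i => (i : Int)
      | none => -1 := by
  unfold locate_cards_alt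
  rw [List.foldl_reverse]
  induction cards with
  | nil => simp [PySem.List.index?_eq_idxOf?]
  | cons x xs ih =>
    rw [List.foldr_cons, ih]
    by_cases hq : x = query
    · rw [hq, PySem.List.index?_cons_self]
      simp
    · rw [PySem.List.index?_cons_of_ne _ hq]
      cases PySem.List.index? xs query with
      | none => simp [hq]
      | some i =>
        have hne : ((i : Int)) ≠ -1 := by omega
        simp only [Option.map_some, if_neg hq, if_pos hne]
        push_cast
        ring

-- ===== VERDICT (by name: the statement is the Claim_ definition above) =====
theorem locate_cards_spec : Claim_equal_locate_cards := by
  intro cards query _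
  unfold Spec_locate_cards locate_cards
  rw [locateLoopA_eq, foldB_eq]
  simp
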